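-- pv_equiv track=rewrite | github.com/polifonia-project/facets-search-engine | facets/lib/search/Sequence.py | rhythms_to_ngrams
-- ===== SOURCE A (Python) =====
-- def rhythms_to_ngrams(dict, NGRAM_SIZE = 3):
--     #
--     #   Splits rhythms ratios into ngrams with size NGRAM_SIZE, e.g : (3/4)(2/3)(1/2) (2/3)(1/2)(1/2) ...
--     #
--     nb_codes = len(dict)
--     text = ""
--     for i in range(nb_codes - NGRAM_SIZE + 1):
--         ngram = ""
--         for j in range(i, i + NGRAM_SIZE):
--             # Surround ratios with parentheses
--             ngram += "(" + str(dict[j]["value"]) + ")"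
--         text += ngram + " N "
--     return text
-- ===== SOURCE B (Python) =====
-- def rhythms_to_ngrams(dict, NGRAM_SIZE = 3):
--     # Transpose NGRAM_SIZE shifted copies of the token table with zip(*...):
--     # each row of the transpose IS one window, so no window index loop at all.
--     if NGRAM_SIZE > len(dict):
--         return ""
--     tokens = ["(" + str(d["value"]) + ")" for d in dict]
--     windows = zip(*(tokens[j:] for j in range(NGRAM_SIZE)))
--     return "".join("".join(w) + " N " for w in windows)
-- ===== Notes on version B (the rewrite author's own statement) =====
-- stated objective: alternative
-- what changed: B has no window loop nor window indices at all: it stringifies each element once into a token table, builds NGRAM_SIZE shifted copies of that table and transposes them with zip(*...), so every row of the transpose is one window, whereas A runs a nested index loop re-stringifying each element inside every window.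
-- outside the precondition, e.g. on rhythms_to_ngrams([{'value': 'a'}, {'value': 'b'}], 0): A returns ' N  N  N ', B returns ''; on rhythms_to_ngrams([{'value': 'a'}, {'value': 'b'}], -1): A returns ' N  N  N  N ', B returns ''; on rhythms_to_ngrams([{}, {}, {}], 3): A raises KeyError, B raises KeyError
import Mathlib
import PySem

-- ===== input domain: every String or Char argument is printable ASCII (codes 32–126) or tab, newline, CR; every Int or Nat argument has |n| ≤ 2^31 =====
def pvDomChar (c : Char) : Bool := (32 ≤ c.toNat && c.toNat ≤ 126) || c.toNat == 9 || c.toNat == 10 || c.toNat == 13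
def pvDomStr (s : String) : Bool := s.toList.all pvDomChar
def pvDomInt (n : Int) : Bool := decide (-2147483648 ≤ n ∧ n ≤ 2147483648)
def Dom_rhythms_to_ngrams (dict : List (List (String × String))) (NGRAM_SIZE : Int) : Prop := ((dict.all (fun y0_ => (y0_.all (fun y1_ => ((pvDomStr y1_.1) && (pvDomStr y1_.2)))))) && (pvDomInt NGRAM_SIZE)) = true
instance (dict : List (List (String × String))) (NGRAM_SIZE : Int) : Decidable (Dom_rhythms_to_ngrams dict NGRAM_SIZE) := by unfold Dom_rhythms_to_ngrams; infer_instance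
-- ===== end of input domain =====

-- B builds the token table once and transposes NGRAM_SIZE shifted copies of it with
-- zip(*...), so each transpose row is one window — no window index loop, unlike A's
-- nested re-stringifying loops ('alternative' algorithm, same cost).


-- ===== PORT A =====
-- d["value"] on the association-list model of a Python dict: first matching pair.
def pvValue (d : List (String × String)) : List Char :=
  (((d.find? (fun p => p.1 == "value")).map Prod.snd).getD "").toList

def rhythms_to_ngrams (dict : List (List (String × String))) (NGRAM_SIZE : Int) : String :=
  let nb_codes : Int := dict.length
  String.ofList ((PySem.List.pyRange 0 (nb_codes - NGRAM_SIZE + 1) 1).foldl (fun text i =>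
      text ++
        ((PySem.List.pyRange i (i + NGRAM_SIZE) 1).foldl (fun ngram j =>
          ngram ++ ['('] ++ pvValue ((PySem.List.pyGet? dict j).getD []) ++ [')']) []) ++
        (" N ".toList)) [])

-- ===== PORT B =====
-- Python's variadic zip(*lists) on a list of lists (no PySem primitive): rows up to the
-- shortest length; exact because each row index is below every list's length, so the
-- filterMap drops nothing.
def pvZip (ls : List (List (List Char))) : List (List (List Char)) :=
  match ls with
  | [] => []
  | l :: rest =>
    (List.range (rest.foldl (fun m l' => min m l'.length) l.length)).map
      (fun i => (l :: rest).filterMap (fun l' => l'[i]?))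

def rhythms_to_ngrams_alt (dict : List (List (String × String))) (NGRAM_SIZE : Int) : String :=
  if (dict.length : Int) < NGRAM_SIZE then "" else
  let tokens : List (List Char) := dict.map (fun d => ['('] ++ pvValue d ++ [')'])
  let windows := pvZip
      ((PySem.List.pyRange 0 NGRAM_SIZE 1).map (fun j => PySem.List.slice tokens (some j) none))
  String.ofList (PySem.Chars.join []
      (windows.map (fun w => PySem.Chars.join [] w ++ " N ".toList)))

-- ===== PRECONDITION & SPEC =====
-- Pre_ excludes (a) NGRAM_SIZE ≤ 0 — a non-positive n-gram size is meaningless and the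
-- corner is anybody's: A emits a row of empty ' N ' separators whose count is an accident
-- of its range arithmetic, while B's empty transpose yields '' — and (b) inputs where some
-- element that A stringifies lacks the "value" key (both Pythons raise KeyError).
def Pre_rhythms_to_ngrams (dict : List (List (String × String))) (NGRAM_SIZE : Int) : Prop :=
  1 ≤ NGRAM_SIZE ∧
    ((dict.length : Int) < NGRAM_SIZE ∨
      ∀ d ∈ dict, (d.find? (fun p => p.1 == "value")).isSome)
instance (dict : List (List (String × String))) (NGRAM_SIZE : Int) : Decidable (Pre_rhythms_to_ngrams dict NGRAM_SIZE) := by unfold Pre_rhythms_to_ngrams; infer_instance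
def pvWitness_rhythms_to_ngrams : (List (List (String × String))) × Int :=
  ([[("value", "3/4")], [("value", "2/3")], [("value", "1/2")], [("value", "1/2")]], 3)

def Spec_rhythms_to_ngrams (dict : List (List (String × String))) (NGRAM_SIZE : Int) (out : String) : Prop := out = rhythms_to_ngrams_alt dict NGRAM_SIZE
instance (dict : List (List (String × String))) (NGRAM_SIZE : Int) (out : String) : Decidable (Spec_rhythms_to_ngrams dict NGRAM_SIZE out) := by unfold Spec_rhythms_to_ngrams; infer_instance

-- ===== CLAIM (what is proved, stated in full; the proofs are below) =====
def Claim_equal_rhythms_to_ngrams : Prop := ∀ (dict : List (List (String × String))) (NGRAM_SIZE : Int), Dom_rhythms_to_ngrams dict NGRAM_SIZE → Pre_rhythms_to_ngrams dict NGRAM_SIZE → Spec_rhythms_to_ngrams dict NGRAM_SIZE (rhythms_to_ngrams dict NGRAM_SIZE)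

-- ===== LEMMAS AND PROOFS =====

-- ''.join on char-list pieces is flatten.
theorem pvJoinNilFlatten (L : List (List Char)) : PySem.Chars.join [] L = L.flatten := by
  induction L with
  | nil => rfl
  | cons x t ih =>
    cases t with
    | nil => rfl
    | cons y t' => simp_all [PySem.Chars.join, List.intercalate, List.intersperse]

-- One window: A's inner indexing loop over range(a, a+n) equals the flattened window of the token table.
theorem pvWindow (dict : List (List (String × String))) (a n : Nat) (h : a + n ≤ dict.length) :
    (PySem.List.pyRange (a : Int) ((a : Int) + (n : Int)) 1).flatMap
        (fun j => ['('] ++ pvValue ((PySem.List.pyGet? dict j).getD []) ++ [')'])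
      = (((dict.map (fun d => ['('] ++ pvValue d ++ [')'])).drop a).take n).flatten := by
  induction n generalizing a with
  | zero =>
    simp [PySem.List.pyRange]
  | succ n ih =>
    have ha : a < dict.length := by omega
    have hcons : PySem.List.pyRange (a : Int) ((a : Int) + ((n + 1 : Nat) : Int)) 1
        = (a : Int) :: PySem.List.pyRange ((a : Int) + 1) ((a : Int) + ((n + 1 : Nat) : Int)) 1 :=
      PySem.List.pyRange_one_cons (by push_cast; omega)
    rw [hcons]
    have hdrop : (dict.map (fun d => ['('] ++ pvValue d ++ [')'])).drop a
        = (['('] ++ pvValue dict[a] ++ [')']) ::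
          (dict.map (fun d => ['('] ++ pvValue d ++ [')'])).drop (a + 1) := by
      rw [List.drop_eq_getElem_cons (by simpa using ha)]
      simp
    rw [hdrop]
    have hget : PySem.List.pyGet? dict ((a : Int)) = some dict[a] := by
      simp [PySem.List.pyGet?_natCast, List.getElem?_eq_getElem ha]
    have harg : (a : Int) + 1 = ((a + 1 : Nat) : Int) := by push_cast; ring
    have harg2 : (a : Int) + ((n + 1 : Nat) : Int) = ((a + 1 : Nat) : Int) + (n : Nat) := by
      push_cast; ring
    rw [List.flatMap_cons, hget, harg, harg2, ih (a + 1) (by omega)]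
    simp

-- min-fold over the lengths of the shifted copies: shortest = length - kk.
theorem pvMinFold (tokens : List (List Char)) (kk : Nat) :
    ((List.range kk).map (fun j => tokens.drop (j + 1))).foldl
        (fun m l' => min m l'.length) tokens.length = tokens.length - kk := by
  induction kk with
  | zero => simp
  | succ kk ih =>
    rw [List.range_succ, List.map_append, List.foldl_append, ih]
    simp; omega

-- one transpose row: picking index i from every shifted copy is the window at i.
theorem pvRow (tokens : List (List Char)) (c i : Nat) (h : i + c ≤ tokens.length) :
    (List.range c).filterMap (fun j => (tokens.drop j)[i]?) = (tokens.drop i).take c := by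
  induction c with
  | zero => simp
  | succ c ih =>
    rw [List.range_succ, List.filterMap_append, ih (by omega), List.take_add_one]
    obtain ⟨x, hx⟩ : ∃ x, (tokens.drop i)[c]? = some x :=
      ⟨_, List.getElem?_eq_getElem (by simp; omega)⟩
    have hs : tokens[c + i]? = some x := by
      rw [Nat.add_comm, ← List.getElem?_drop]; exact hx
    simp [hs, hx]

-- the whole transpose of the kk+1 shifted copies: one row per window start.
theorem pvZipShifts (tokens : List (List Char)) (kk : Nat) :
    pvZip ((List.range (kk + 1)).map (fun j => tokens.drop j))
      = (List.range (tokens.length - kk)).map (fun i => (tokens.drop i).take (kk + 1)) := by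
  rw [List.range_succ_eq_map, List.map_cons, List.map_map]
  unfold pvZip
  simp only [List.drop_zero, Function.comp_def, Nat.succ_eq_add_one]
  rw [pvMinFold]
  apply List.map_congr_left
  intro i hi
  have hi' : i < tokens.length - kk := List.mem_range.mp hi
  obtain ⟨x, h0⟩ : ∃ x, tokens[i]? = some x :=
    ⟨_, List.getElem?_eq_getElem (by omega)⟩
  rw [← pvRow tokens (kk + 1) i (by omega), List.range_succ_eq_map]
  simp [h0, List.filterMap_map]

theorem rhythms_to_ngrams_spec_aux (dict : List (List (String × String))) (N : Int)
    (hN : 1 ≤ N) :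
    rhythms_to_ngrams dict N = rhythms_to_ngrams_alt dict N := by
  unfold rhythms_to_ngrams rhythms_to_ngrams_alt
  dsimp only
  by_cases hlt : ((dict.length : Nat) : Int) < N
  case pos =>
    rw [if_pos hlt, PySem.List.pyRange_one_eq_nil (by omega)]
    rfl
  rw [if_neg hlt]
  set tokens : List (List Char) := dict.map (fun d => ['('] ++ pvValue d ++ [')']) with htok
  -- name k = N as a successor natural
  obtain ⟨kk, hkk⟩ : ∃ kk : Nat, N = ((kk + 1 : Nat) : Int) :=
    ⟨(N - 1).toNat, by omega⟩
  -- B side: shifted copies are drops, the transpose is the window list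
  have hshift : (PySem.List.pyRange 0 N 1).map (fun j => PySem.List.slice tokens (some j) none)
      = (List.range (kk + 1)).map (fun j => tokens.drop j) := by
    rw [PySem.List.pyRange_one, List.map_map, hkk]
    have : ((((kk + 1 : Nat) : Int)) - 0).toNat = kk + 1 := by omega
    rw [this]
    apply List.map_congr_left
    intro j _
    simp only [Function.comp]
    rw [zero_add, PySem.List.slice_from_natCast]
  rw [hshift, pvZipShifts, pvJoinNilFlatten]
  apply congrArg String.ofList
  -- A side: fold → flatMap over windows
  have houter :
      (PySem.List.pyRange 0 ((dict.length : Int) - N + 1) 1).foldl (fun text i =>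
          text ++
            ((PySem.List.pyRange i (i + N) 1).foldl (fun ngram j =>
              ngram ++ ['('] ++ pvValue ((PySem.List.pyGet? dict j).getD []) ++ [')']) []) ++
            (" N ".toList)) []
        = (PySem.List.pyRange 0 ((dict.length : Int) - N + 1) 1).flatMap (fun i =>
            ((PySem.List.pyRange i (i + N) 1).foldl (fun ngram j =>
              ngram ++ ['('] ++ pvValue ((PySem.List.pyGet? dict j).getD []) ++ [')']) []) ++
            (" N ".toList)) := by
    have hfun : (fun (text : List Char) (i : Int) =>
        text ++
          ((PySem.List.pyRange i (i + N) 1).foldl (fun ngram j =>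
            ngram ++ ['('] ++ pvValue ((PySem.List.pyGet? dict j).getD []) ++ [')']) []) ++
          (" N ".toList))
      = (fun (text : List Char) (i : Int) =>
        text ++
          (((PySem.List.pyRange i (i + N) 1).foldl (fun ngram j =>
            ngram ++ ['('] ++ pvValue ((PySem.List.pyGet? dict j).getD []) ++ [')']) []) ++
          (" N ".toList))) := by
      funext t i; rw [List.append_assoc]
    rw [hfun]
    simpa using PySem.List.foldl_append_eq_flatMap
      (g := fun i =>
        ((PySem.List.pyRange i (i + N) 1).foldl (fun ngram j =>
          ngram ++ ['('] ++ pvValue ((PySem.List.pyGet? dict j).getD []) ++ [')']) []) ++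
        (" N ".toList)) (l := PySem.List.pyRange 0 ((dict.length : Int) - N + 1) 1) (acc := [])
  rw [houter]
  -- both sides become flattens over the same list of window starts
  have hcnt : (((dict.length : Int) - N + 1) - 0).toNat = dict.length - kk := by
    omega
  have hlen : tokens.length = dict.length := by rw [htok]; simp
  rw [PySem.List.pyRange_one, List.flatMap_map, hcnt, List.map_map, List.flatMap_def, hlen]
  apply congrArg List.flatten
  apply List.map_congr_left
  intro m hm
  have hm' : m < dict.length - kk := List.mem_range.mp hm
  simp only [Function.comp]
  -- A's inner fold at window start m
  have hinner :
      (PySem.List.pyRange (0 + (m : Int)) ((0 + (m : Int)) + N) 1).foldl (fun ngram j =>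
          ngram ++ ['('] ++ pvValue ((PySem.List.pyGet? dict j).getD []) ++ [')']) []
        = (PySem.List.pyRange (0 + (m : Int)) ((0 + (m : Int)) + N) 1).flatMap (fun j =>
            ['('] ++ pvValue ((PySem.List.pyGet? dict j).getD []) ++ [')']) := by
    have hfun : (fun (ngram : List Char) (j : Int) =>
        ngram ++ ['('] ++ pvValue ((PySem.List.pyGet? dict j).getD []) ++ [')'])
      = (fun (ngram : List Char) (j : Int) =>
        ngram ++ (['('] ++ pvValue ((PySem.List.pyGet? dict j).getD []) ++ [')'])) := by
      funext g j; simp [List.append_assoc]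
    rw [hfun]
    simpa using PySem.List.foldl_append_eq_flatMap
      (g := fun j => ['('] ++ pvValue ((PySem.List.pyGet? dict j).getD []) ++ [')'])
      (l := PySem.List.pyRange (0 + (m : Int)) ((0 + (m : Int)) + N) 1) (acc := [])
  rw [hinner]
  have hz : (0 : Int) + (m : Int) = ((m : Nat) : Int) := by ring
  rw [hz, hkk, pvWindow dict m (kk + 1) (by omega), ← htok, pvJoinNilFlatten]
-- ===== VERDICT (by name: the statement is the Claim_ definition above) =====
theorem rhythms_to_ngrams_spec : Claim_equal_rhythms_to_ngrams := by
  intro dict N _ hPre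
  unfold Spec_rhythms_to_ngrams
  exact rhythms_to_ngrams_spec_aux dict N hPre.1
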